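-- pv_equiv track=rewrite | github.com/Kaushal-fy/dairy_manager | src/ui_components/search_interface.py | filter_buyers
-- ===== SOURCE A (Python) =====
-- from typing import List, Optional
--
-- def filter_buyers(query: str, buyers: List[str]) -> List[str]:
--     """Filter buyers based on search query."""
--     if not query or not buyers:
--         return buyers
--
--     query_lower = query.lower().strip()
--
--     # Filter buyers that contain the query (case-insensitive)
--     filtered = [buyer for buyer in buyers if query_lower in buyer.lower()]
--
--     # Sort by relevance (exact matches first, then starts with, then contains)
--     exact_matches = [b for b in filtered if b.lower() == query_lower]
--     starts_with = [b for b in filtered if b.lower().startswith(query_lower) and b not in exact_matches]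
--     contains = [b for b in filtered if b not in exact_matches and b not in starts_with]
--
--     return exact_matches + starts_with + contains
-- ===== SOURCE B (Python) =====
-- def filter_buyers(query, buyers):
--     """Filter buyers based on search query (single pass, three relevance buckets)."""
--     if not query or not buyers:
--         return buyers
--     q = query.lower().strip()
--     exact, starts, contains = [], [], []
--     for b in buyers:
--         bl = b.lower()
--         if q not in bl:
--             continue
--         if bl == q:
--             exact.append(b)
--         elif bl.startswith(q):
--             starts.append(b)
--         else:
--             contains.append(b)
--     return exact + starts + contains
-- ===== Notes on version B (the rewrite author's own statement) =====
-- stated objective: alternative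
-- what changed: Replaced A's filter-then-three-more-passes-with-list-membership-tests ('b not in exact_matches' scans over the match lists) by a single pass that classifies each buyer directly into exact/starts-with/contains buckets; same cost on typical inputs where few buyers match, avoids the quadratic membership scans when many do.
import Mathlib
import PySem

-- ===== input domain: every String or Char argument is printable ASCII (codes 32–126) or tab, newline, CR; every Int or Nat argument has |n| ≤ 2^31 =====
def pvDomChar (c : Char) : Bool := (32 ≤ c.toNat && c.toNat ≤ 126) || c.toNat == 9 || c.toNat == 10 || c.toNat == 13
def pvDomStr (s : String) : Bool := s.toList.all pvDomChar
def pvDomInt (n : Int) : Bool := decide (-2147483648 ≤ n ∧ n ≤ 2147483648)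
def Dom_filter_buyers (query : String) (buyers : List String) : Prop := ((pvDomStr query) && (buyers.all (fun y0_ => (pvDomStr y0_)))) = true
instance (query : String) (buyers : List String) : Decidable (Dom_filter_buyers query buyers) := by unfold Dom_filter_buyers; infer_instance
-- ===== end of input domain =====

-- B replaces A's three-pass relevance sort with list-membership tests by one pass
-- classifying each buyer into three buckets (objective: alternative).

-- ===== PORT A =====
def filter_buyers (query : String) (buyers : List String) : List String :=
  if query == "" || buyers == [] then buyers
  else
    let query_lower := PySem.Str.strip (PySem.Str.lower query)
    let filtered := buyers.filter (fun buyer => PySem.Str.isIn query_lower (PySem.Str.lower buyer))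
    let exact_matches := filtered.filter (fun b => PySem.Str.lower b == query_lower)
    let starts_with := filtered.filter (fun b =>
      PySem.Str.startswith (PySem.Str.lower b) query_lower && !(exact_matches.contains b))
    let contains := filtered.filter (fun b =>
      !(exact_matches.contains b) && !(starts_with.contains b))
    exact_matches ++ starts_with ++ contains

-- ===== PORT B =====
def filter_buyers_alt_loop (q : String) (buyers : List String)
    (acc : List String × List String × List String) : List String × List String × List String :=
  match buyers with
  | [] => acc
  | b :: rest =>
    let bl := PySem.Str.lower b
    if !(PySem.Str.isIn q bl) then
      filter_buyers_alt_loop q rest acc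
    else if bl == q then
      filter_buyers_alt_loop q rest (acc.1 ++ [b], acc.2.1, acc.2.2)
    else if PySem.Str.startswith bl q then
      filter_buyers_alt_loop q rest (acc.1, acc.2.1 ++ [b], acc.2.2)
    else
      filter_buyers_alt_loop q rest (acc.1, acc.2.1, acc.2.2 ++ [b])

def filter_buyers_alt (query : String) (buyers : List String) : List String :=
  if query == "" || buyers == [] then buyers
  else
    let q := PySem.Str.strip (PySem.Str.lower query)
    let r := filter_buyers_alt_loop q buyers ([], [], [])
    r.1 ++ r.2.1 ++ r.2.2

-- ===== PRECONDITION & SPEC =====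
def Spec_filter_buyers (query : String) (buyers : List String) (out : List String) : Prop := out = filter_buyers_alt query buyers
instance (query : String) (buyers : List String) (out : List String) : Decidable (Spec_filter_buyers query buyers out) := by unfold Spec_filter_buyers; infer_instance

-- ===== CLAIM (what is proved, stated in full; the proofs are below) =====
def Claim_equal_filter_buyers : Prop := ∀ (query : String) (buyers : List String), Dom_filter_buyers query buyers → Spec_filter_buyers query buyers (filter_buyers query buyers)

-- ===== LEMMAS AND PROOFS =====

-- B's loop with accumulators (e, s, c) appends exactly the three bucket filters of the rest.
theorem loop_spec (q : String) (buyers : List String) (e s c : List String) :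
    filter_buyers_alt_loop q buyers (e, s, c) =
      (e ++ buyers.filter (fun b => PySem.Str.isIn q (PySem.Str.lower b) && (PySem.Str.lower b == q)),
       s ++ buyers.filter (fun b => PySem.Str.isIn q (PySem.Str.lower b) && !(PySem.Str.lower b == q)
              && PySem.Str.startswith (PySem.Str.lower b) q),
       c ++ buyers.filter (fun b => PySem.Str.isIn q (PySem.Str.lower b) && !(PySem.Str.lower b == q)
              && !(PySem.Str.startswith (PySem.Str.lower b) q))) := by
  induction buyers generalizing e s c with
  | nil => simp [filter_buyers_alt_loop]
  | cons b rest ih =>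
    by_cases h1 : PySem.Str.isIn q (PySem.Str.lower b) = true
    · have h1' : PySem.Chars.isIn q.toList (PySem.Chars.lower b.toList) = true := by
        simpa using h1
      by_cases h2 : PySem.Str.lower b == q
      · simp [filter_buyers_alt_loop, h1', h2, ih]
      · by_cases h3 : PySem.Str.startswith (PySem.Str.lower b) q
        · have h3' : PySem.Chars.startswith (PySem.Chars.lower b.toList) q.toList = true := by
            simpa using h3
          simp [filter_buyers_alt_loop, h1', h2, h3', ih]
        · have h3' : PySem.Chars.startswith (PySem.Chars.lower b.toList) q.toList = false := by
            simpa using h3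
          simp [filter_buyers_alt_loop, h1', h2, h3', ih]
    · have h1' : PySem.Chars.isIn q.toList (PySem.Chars.lower b.toList) = false := by
        simpa using h1
      simp [filter_buyers_alt_loop, h1', ih]

-- membership test `b in filter pred l` (Python ==) is just `pred b` for b ∈ l
theorem contains_filter (l : List String) (pred : String → Bool) (b : String) (hb : b ∈ l) :
    ((l.filter pred).contains b) = pred b := by
  by_cases h : pred b = true
  · rw [h]
    simp [List.mem_filter, hb, h]
  · rw [Bool.eq_false_iff.mpr h]
    simp [List.mem_filter]
    intro _
    exact Bool.eq_false_iff.mpr h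

-- ===== VERDICT (by name: the statement is the Claim_ definition above) =====
theorem filter_buyers_spec : Claim_equal_filter_buyers := by
  intro query buyers _
  unfold Spec_filter_buyers filter_buyers filter_buyers_alt
  by_cases hq : (query == "" || buyers == []) = true
  · rw [if_pos hq, if_pos hq]
  · rw [if_neg hq, if_neg hq]
    dsimp only
    rw [loop_spec]
    set q := PySem.Str.strip (PySem.Str.lower query) with hqdef
    set p := fun b => PySem.Str.isIn q (PySem.Str.lower b) with hp
    have hmem_exact : ∀ b ∈ buyers.filter p,
        ((buyers.filter p).filter (fun x => PySem.Str.lower x == q)).contains b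
          = (PySem.Str.lower b == q) :=
      fun b hb => contains_filter _ _ b hb
    have hmem_starts : ∀ b ∈ buyers.filter p,
        (((buyers.filter p).filter (fun x =>
            PySem.Str.startswith (PySem.Str.lower x) q &&
            !(((buyers.filter p).filter (fun y => PySem.Str.lower y == q)).contains x))).contains b)
          = (PySem.Str.startswith (PySem.Str.lower b) q && !(PySem.Str.lower b == q)) := by
      intro b hb
      rw [contains_filter _ _ b hb, hmem_exact b hb]
    -- the three filters over `filtered`, as filters over `buyers`
    have hexact : (buyers.filter p).filter (fun b => PySem.Str.lower b == q)
        = buyers.filter (fun b => p b && (PySem.Str.lower b == q)) := by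
      rw [List.filter_filter]
      exact List.filter_congr (fun b _ => by
        cases p b <;> cases (PySem.Str.lower b == q) <;> rfl)
    have hstarts : (buyers.filter p).filter (fun b =>
          PySem.Str.startswith (PySem.Str.lower b) q &&
          !(((buyers.filter p).filter (fun x => PySem.Str.lower x == q)).contains b))
        = buyers.filter (fun b => p b && !(PySem.Str.lower b == q)
            && PySem.Str.startswith (PySem.Str.lower b) q) := by
      rw [List.filter_congr (fun b hb => by rw [hmem_exact b hb])]
      rw [List.filter_filter]
      exact List.filter_congr (fun b _ => by
        cases p b <;> cases (PySem.Str.lower b == q) <;>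
          cases PySem.Str.startswith (PySem.Str.lower b) q <;> rfl)
    have hcontains : (buyers.filter p).filter (fun b =>
          !(((buyers.filter p).filter (fun x => PySem.Str.lower x == q)).contains b) &&
          !(((buyers.filter p).filter (fun x =>
              PySem.Str.startswith (PySem.Str.lower x) q &&
              !(((buyers.filter p).filter (fun y => PySem.Str.lower y == q)).contains x))).contains b))
        = buyers.filter (fun b => p b && !(PySem.Str.lower b == q)
            && !(PySem.Str.startswith (PySem.Str.lower b) q)) := by
      rw [List.filter_congr (fun b hb => by rw [hmem_exact b hb, hmem_starts b hb])]
      rw [List.filter_filter]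
      exact List.filter_congr (fun b _ => by
        cases p b <;> cases (PySem.Str.lower b == q) <;>
          cases PySem.Str.startswith (PySem.Str.lower b) q <;> rfl)
    rw [hcontains, hstarts, hexact]
    simp [hp]
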